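-- pv_equiv track=rewrite | github.com/capta1nfire/FutbolStats | app/etl/api_football.py | _select_primary_standings_group
-- ===== SOURCE A (Python) =====
-- def _select_primary_standings_group(standings: list[dict]) -> list[dict]:
--     """
--     API-Football can return multiple tables for the same league/season (groups/stages).
--     If we blindly flatten, some leagues show duplicated teams (e.g., Apertura/Clausura).
--
--     Strategy:
--     - If no 'group' info, return as-is.
--     - Group by 'group' and pick a primary group deterministically:
--       1) Most teams (n)
--       2) Highest total played (sum played)
--       3) Preferred group name (Regular Season > Apertura > Clausura)
--     """
--     groups: dict[str, list[dict]] = {}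
--     for row in standings:
--         g = row.get("group")
--         if not g:
--             continue
--         groups.setdefault(str(g), []).append(row)
--
--     if not groups:
--         return standings
--
--     preferred = ["Regular Season", "Apertura", "Clausura"]
--
--     def score(item: tuple[str, list[dict]]) -> tuple[int, int, int]:
--         name, rows = item
--         n = len(rows)
--         total_played = 0
--         for r in rows:
--             try:
--                 total_played += int(r.get("played") or 0)
--             except Exception:
--                 pass
--         pref_rank = 0
--         for i, p in enumerate(preferred):
--             if p.lower() in name.lower():
--                 pref_rank = len(preferred) - i
--                 break
--         return (n, total_played, pref_rank)
--
--     best_group, best_rows = sorted(groups.items(), key=score, reverse=True)[0]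
--     return best_rows
-- ===== SOURCE B (Python) =====
-- def _select_primary_standings_group(standings: list[dict]) -> list[dict]:
--     # One pass: accumulate per-group (team count, total played) summaries instead of
--     # storing row lists; pick the best group NAME by max over the score tuple
--     # (first maximum wins, as in the stable reverse sort); then filter standings once.
--     summary: dict[str, tuple[int, int]] = {}
--     for row in standings:
--         g = row.get("group")
--         if not g:
--             continue
--         name = str(g)
--         cnt, tot = summary.get(name, (0, 0))
--         try:
--             played = int(row.get("played") or 0)
--         except Exception:
--             played = 0
--         summary[name] = (cnt + 1, tot + played)
--
--     if not summary:
--         return standings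
--
--     def _rank(low: str) -> int:
--         if "regular season" in low:
--             return 3
--         if "apertura" in low:
--             return 2
--         if "clausura" in low:
--             return 1
--         return 0
--
--     best = max(summary, key=lambda name: (summary[name][0], summary[name][1], _rank(name.lower())))
--     return [row for row in standings if str(row.get("group") or "") == best]
-- ===== Notes on version B (the rewrite author's own statement) =====
-- stated objective: alternative
-- what changed: Instead of grouping rows into per-group lists and taking the head of a stable reverse sort of all groups, B accumulates only a (count, total played) summary per group name in one pass, picks the winning name with a single first-max-wins max over the score tuple, and rebuilds the result by one filter over standings.
import Mathlib
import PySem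

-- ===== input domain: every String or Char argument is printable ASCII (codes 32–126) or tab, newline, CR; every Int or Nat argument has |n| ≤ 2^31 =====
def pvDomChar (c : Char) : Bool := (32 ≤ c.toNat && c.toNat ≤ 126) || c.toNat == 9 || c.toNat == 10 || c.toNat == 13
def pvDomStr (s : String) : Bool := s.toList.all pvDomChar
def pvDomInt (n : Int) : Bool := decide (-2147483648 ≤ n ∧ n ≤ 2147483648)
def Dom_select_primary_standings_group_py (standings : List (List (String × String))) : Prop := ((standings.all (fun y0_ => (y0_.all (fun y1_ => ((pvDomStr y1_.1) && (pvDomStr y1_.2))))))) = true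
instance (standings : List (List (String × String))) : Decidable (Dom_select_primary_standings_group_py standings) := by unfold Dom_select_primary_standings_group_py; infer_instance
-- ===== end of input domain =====

-- B replaces A's per-group row lists + stable reverse sort by one-pass (count, played) summaries,
-- a single first-max-wins max over group names, and one filter over standings (alternative decomposition).


-- ===== PORT A =====
-- int(r.get("played") or 0) inside A's try/except: a missing or empty value and a failed
-- int() parse both contribute 0 (the except branch adds nothing); exact on the stated domain.
def pvPlayedInt (row : List (String × String)) : Int :=
  match (PySem.Dict.mk row).get? "played" with
  | none => 0
  | some s => if s = "" then 0 else (PySem.Int.ofStr? s).getD 0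

def pvPreferred : List String := ["Regular Season", "Apertura", "Clausura"]

-- A's pref_rank loop: for i, p in enumerate(preferred): first hit wins (break), else 0
def pvPrefRank (name : String) : Int :=
  ((PySem.List.enumerate pvPreferred 0).foldl
    (fun (st : Option Int) ip =>
      match st with
      | some r => some r
      | none => if PySem.Str.isIn (PySem.Str.lower ip.2) (PySem.Str.lower name)
                then some ((pvPreferred.length : Int) - ip.1) else none) none).getD 0

-- A's score(item) as Python's lexicographic (n, total_played, pref_rank) tuple
def pvScoreA (item : String × List (List (String × String))) : Lex (Int × Lex (Int × Int)) :=
  toLex ((item.2.length : Int),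
    toLex (item.2.foldl (fun acc r => acc + pvPlayedInt r) 0, pvPrefRank item.1))

-- groups.setdefault(str(g), []).append(row)  =  d.modify g [] (· ++ [row])
def pvGroupsA (standings : List (List (String × String))) : PySem.Dict String (List (List (String × String))) :=
  standings.foldl (fun d row =>
    match (PySem.Dict.mk row).get? "group" with
    | none => d
    | some g => if g = "" then d else d.modify g [] (fun rows => rows ++ [row]))
    PySem.Dict.empty

def select_primary_standings_group_py (standings : List (List (String × String))) : List (List (String × String)) :=
  let groups := pvGroupsA standings
  if groups.items = [] then standings
  else
    match PySem.List.sorted groups.items pvScoreA true with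
    | [] => []            -- unreachable: groups is nonempty
    | item :: _ => item.2

-- ===== PORT B =====
-- B's _rank on the pre-lowered name: early-return chain
def pvRankB (low : String) : Int :=
  if PySem.Str.isIn "regular season" low then 3
  else if PySem.Str.isIn "apertura" low then 2
  else if PySem.Str.isIn "clausura" low then 1
  else 0

-- B's one-pass summary: name -> (count, total played); same try/except coercion as A
def pvSummaryB (standings : List (List (String × String))) : PySem.Dict String (Int × Int) :=
  standings.foldl (fun d row =>
    match (PySem.Dict.mk row).get? "group" with
    | none => d
    | some g => if g = "" then d
      else
        let c := d.getD g (0, 0)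
        d.insert g (c.1 + 1, c.2 + pvPlayedInt row))
    PySem.Dict.empty

-- B's max key: lambda name: (summary[name][0], summary[name][1], _rank(name.lower()))
def pvKeyB (s : PySem.Dict String (Int × Int)) (name : String) : Lex (Int × Lex (Int × Int)) :=
  toLex ((s.getD name (0, 0)).1, toLex ((s.getD name (0, 0)).2, pvRankB (PySem.Str.lower name)))

def select_primary_standings_group_py_alt (standings : List (List (String × String))) : List (List (String × String)) :=
  let s := pvSummaryB standings
  match PySem.List.max? s.keys (pvKeyB s) with
  | none => standings          -- empty summary: return as-is
  | some best => standings.filter (fun row => ((PySem.Dict.mk row).get? "group").getD "" == best)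

-- ===== PRECONDITION & SPEC =====
def Spec_select_primary_standings_group_py (standings : List (List (String × String))) (out : List (List (String × String))) : Prop := out = select_primary_standings_group_py_alt standings
instance (standings : List (List (String × String))) (out : List (List (String × String))) : Decidable (Spec_select_primary_standings_group_py standings out) := by unfold Spec_select_primary_standings_group_py; infer_instance

-- ===== CLAIM (what is proved, stated in full; the proofs are below) =====
def Claim_equal_select_primary_standings_group_py : Prop := ∀ (standings : List (List (String × String))), Dom_select_primary_standings_group_py standings → Spec_select_primary_standings_group_py standings (select_primary_standings_group_py standings)

-- ===== LEMMAS AND PROOFS =====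

-- proof-side views of a row: its truthy group name (default "") and truthiness test
def pvG (row : List (String × String)) : String := ((PySem.Dict.mk row).get? "group").getD ""
def pvT (row : List (String × String)) : Bool := pvG row != ""

theorem pvStepA_eq (d : PySem.Dict String (List (List (String × String)))) (row : List (String × String)) :
    (match (PySem.Dict.mk row).get? "group" with
      | none => d
      | some g => if g = "" then d else d.modify g [] (fun rows => rows ++ [row]))
    = if pvT row then d.modify (pvG row) [] (fun rows => rows ++ [row]) else d := by
  cases h : (PySem.Dict.mk row).get? "group" with
  | none => simp [pvT, pvG, h]
  | some g => by_cases hg : g = "" <;> simp [pvT, pvG, h, hg]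

theorem pvGroupsA_eq_filter_foldl (standings : List (List (String × String))) :
    pvGroupsA standings
      = (standings.filter pvT).foldl
          (fun d row => d.modify (pvG row) [] (fun rows => rows ++ [row])) PySem.Dict.empty := by
  unfold pvGroupsA
  rw [← PySem.List.foldl_if_eq_foldl_filter]
  congr 1
  funext d row
  exact pvStepA_eq d row

theorem pvStepB_eq (d : PySem.Dict String (Int × Int)) (row : List (String × String)) :
    (match (PySem.Dict.mk row).get? "group" with
      | none => d
      | some g => if g = "" then d
        else
          let c := d.getD g (0, 0)
          d.insert g (c.1 + 1, c.2 + pvPlayedInt row))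
    = if pvT row then
        d.insert (pvG row) ((d.getD (pvG row) (0, 0)).1 + 1,
          (d.getD (pvG row) (0, 0)).2 + pvPlayedInt row)
      else d := by
  cases h : (PySem.Dict.mk row).get? "group" with
  | none => simp [pvT, pvG, h]
  | some g => by_cases hg : g = "" <;> simp [pvT, pvG, h, hg]

theorem pvSummaryB_eq_filter_foldl (standings : List (List (String × String))) :
    pvSummaryB standings
      = (standings.filter pvT).foldl
          (fun d row =>
            d.insert (pvG row) ((d.getD (pvG row) (0, 0)).1 + 1,
              (d.getD (pvG row) (0, 0)).2 + pvPlayedInt row)) PySem.Dict.empty := by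
  unfold pvSummaryB
  rw [← PySem.List.foldl_if_eq_foldl_filter]
  congr 1
  funext d row
  exact pvStepB_eq d row

theorem pvGroupsA_getD (standings : List (List (String × String))) (c : String) :
    (pvGroupsA standings).getD c []
      = (standings.filter pvT).filter (fun row => pvG row == c) := by
  rw [pvGroupsA_eq_filter_foldl]
  have h : (standings.filter pvT).foldl
      (fun d row => d.modify (pvG row) [] (fun rows => rows ++ [row])) PySem.Dict.empty
    = ((standings.filter pvT).map (fun r => (pvG r, r))).foldl
      (fun d p => d.modify p.1 [] (fun rows => rows ++ [p.2])) PySem.Dict.empty := by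
    rw [List.foldl_map]
  rw [h, PySem.Dict.getD_foldl_modify_append]
  simp [List.filter_map, Function.comp_def, List.map_map]

theorem pvFoldB_getD (l : List (List (String × String)))
    (d : PySem.Dict String (Int × Int)) (c : String) :
    (l.foldl (fun d row =>
        d.insert (pvG row) ((d.getD (pvG row) (0, 0)).1 + 1,
          (d.getD (pvG row) (0, 0)).2 + pvPlayedInt row)) d).getD c (0, 0)
      = ((d.getD c (0, 0)).1 + ((l.filter (fun row => pvG row == c)).length : Int),
         (d.getD c (0, 0)).2 + (((l.filter (fun row => pvG row == c)).map pvPlayedInt).sum)) := by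
  induction l generalizing d with
  | nil => simp
  | cons row t ih =>
    simp only [List.foldl_cons, ih]
    by_cases hc : pvG row = c
    · simp [hc]
      constructor <;> ring
    · simp [hc, PySem.Dict.getD_insert, Ne.symm hc]

theorem pvSummaryB_getD (standings : List (List (String × String))) (c : String) :
    (pvSummaryB standings).getD c (0, 0)
      = ((((standings.filter pvT).filter (fun row => pvG row == c)).length : Int),
         ((((standings.filter pvT).filter (fun row => pvG row == c)).map pvPlayedInt).sum)) := by
  rw [pvSummaryB_eq_filter_foldl, pvFoldB_getD]
  simp

theorem pvKeys_eq (standings : List (List (String × String))) :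
    (pvSummaryB standings).keys = (pvGroupsA standings).keys := by
  rw [pvSummaryB_eq_filter_foldl, pvGroupsA_eq_filter_foldl,
    PySem.Dict.keys_foldl_insert_key, PySem.Dict.keys_foldl_modify_key]
  rfl

theorem pvGroupsA_nodup_keys (standings : List (List (String × String))) :
    (pvGroupsA standings).keys.Nodup := by
  rw [pvGroupsA_eq_filter_foldl]
  exact PySem.Dict.nodup_keys_foldl_modify_key _ _ _ _ _ PySem.Dict.nodup_keys_empty

theorem pvGroupsA_keys_ne_empty (standings : List (List (String × String))) (k : String)
    (hk : k ∈ (pvGroupsA standings).keys) : k ≠ "" := by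
  rw [pvGroupsA_eq_filter_foldl, PySem.Dict.keys_foldl_modify_key] at hk
  have hmem : k ∈ (standings.filter pvT).map pvG :=
    (PySem.Set.mem_ofList _ _).mp (by
      simpa [PySem.Set.update, PySem.Set.ofList_eq_foldl, PySem.Dict.keys_empty] using hk)
  rcases List.mem_map.mp hmem with ⟨row, hrow, hG⟩
  have ht : pvT row := (List.mem_filter.mp hrow).2
  simp [pvT, hG] at ht
  exact ht

theorem pvPrefRank_eq_rankB (name : String) :
    pvPrefRank name = pvRankB (PySem.Str.lower name) := by
  have h1 : PySem.Str.lower "Regular Season" = "regular season" := by decide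
  have h2 : PySem.Str.lower "Apertura" = "apertura" := by decide
  have h3 : PySem.Str.lower "Clausura" = "clausura" := by decide
  simp only [pvPrefRank, pvPreferred, PySem.List.enumerate, List.foldl, h1, h2, h3, pvRankB]
  split_ifs with c1 c2 c3 <;> simp_all

theorem pvHead_insertBy {α κ : Type} [LT κ] [DecidableLT κ]
    (key : α → κ) (x : α) (ys : List α) :
    (PySem.List.insertBy (fun a b => decide (key b < key a)) x ys).head?
      = some (match ys.head? with
          | none => x
          | some m => if key m < key x then x else m) := by
  cases ys with
  | nil => simp [PySem.List.insertBy]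
  | cons y t =>
    by_cases h : key y < key x <;> simp [PySem.List.insertBy, h]

theorem pvHead_foldl_insertBy {α κ : Type} [LT κ] [DecidableLT κ]
    (key : α → κ) (l : List α) (acc : List α) :
    (l.foldl (fun acc x => PySem.List.insertBy (fun a b => decide (key b < key a)) x acc) acc).head?
      = l.foldl (fun (st : Option α) x =>
          match st with
          | none => some x
          | some m => if key m < key x then some x else some m) acc.head? := by
  induction l generalizing acc with
  | nil => rfl
  | cons x t ih =>
    simp only [List.foldl_cons, ih, pvHead_insertBy]
    cases acc with
    | nil => rfl
    | cons a r => by_cases h : key a < key x <;> simp [h]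

theorem pvHead_sorted_rev_eq_max? {α κ : Type} [LT κ] [DecidableLT κ]
    (l : List α) (key : α → κ) :
    (PySem.List.sorted l key true).head? = PySem.List.max? l key := by
  simp only [PySem.List.sorted, PySem.List.max?]
  exact pvHead_foldl_insertBy key l []

theorem pvMax?_foldl_map {α β κ : Type} [LT κ] [DecidableLT κ]
    (l : List β) (f : β → α) (key : α → κ) (acc : Option β) :
    ((l.map f).foldl (fun (st : Option α) x =>
        match st with
        | none => some x
        | some m => if key m < key x then some x else some m) (acc.map f))
      = (l.foldl (fun (st : Option β) x =>
          match st with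
          | none => some x
          | some m => if key (f m) < key (f x) then some x else some m) acc).map f := by
  induction l generalizing acc with
  | nil => rfl
  | cons x t ih =>
    simp only [List.map_cons, List.foldl_cons]
    cases acc with
    | none => exact ih (some x)
    | some m =>
      by_cases h : key (f m) < key (f x) <;> simp only [Option.map_some, h,
        ite_true, ite_false] <;> [exact ih (some x); exact ih (some m)]

theorem pvMax?_map {α β κ : Type} [LT κ] [DecidableLT κ]
    (l : List β) (f : β → α) (key : α → κ) :
    PySem.List.max? (l.map f) key = (PySem.List.max? l (fun b => key (f b))).map f := by
  simpa using pvMax?_foldl_map l f key none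

theorem pvScore_eq (standings : List (List (String × String))) (k : String) :
    pvScoreA (k, (pvGroupsA standings).getD k []) = pvKeyB (pvSummaryB standings) k := by
  simp only [pvScoreA, pvKeyB, pvSummaryB_getD, pvGroupsA_getD, pvPrefRank_eq_rankB,
    PySem.List.foldl_add]
  simp

theorem select_primary_standings_group_py_spec : Claim_equal_select_primary_standings_group_py := by
  intro standings _
  unfold Spec_select_primary_standings_group_py
  show select_primary_standings_group_py standings = _
  unfold select_primary_standings_group_py select_primary_standings_group_py_alt
  by_cases hempty : (pvGroupsA standings).items = []
  · have hk : (pvSummaryB standings).keys = [] := by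
      rw [pvKeys_eq]; simp [PySem.Dict.keys, hempty]
    simp [hempty, hk, PySem.List.max?]
  · have hkeysne : (pvGroupsA standings).keys ≠ [] := by
      simp [PySem.Dict.keys, hempty]
    -- B's max over keys is some best
    obtain ⟨best, hbest⟩ : ∃ b, PySem.List.max? (pvGroupsA standings).keys
        (pvKeyB (pvSummaryB standings)) = some b := by
      cases hm : PySem.List.max? (pvGroupsA standings).keys (pvKeyB (pvSummaryB standings)) with
      | none => exact absurd ((PySem.List.max?_eq_none_iff _ _).mp hm) hkeysne
      | some b => exact ⟨b, rfl⟩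
    have hbmem : best ∈ (pvGroupsA standings).keys := PySem.List.max?_mem hbest
    have hbne : best ≠ "" := pvGroupsA_keys_ne_empty standings best hbmem
    -- A's sorted head is the same best
    have hitems : (pvGroupsA standings).items
        = (pvGroupsA standings).keys.map (fun k => (k, (pvGroupsA standings).getD k [])) :=
      PySem.Dict.items_eq_map_keys _ (pvGroupsA_nodup_keys standings) []
    have hhead : (PySem.List.sorted (pvGroupsA standings).items pvScoreA true).head?
        = some (best, (pvGroupsA standings).getD best []) := by
      rw [pvHead_sorted_rev_eq_max?, hitems, pvMax?_map]
      have : (fun k => pvScoreA (k, (pvGroupsA standings).getD k []))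
          = pvKeyB (pvSummaryB standings) := by
        funext k; exact pvScore_eq standings k
      rw [this, hbest]
      rfl
    cases hs : PySem.List.sorted (pvGroupsA standings).items pvScoreA true with
    | nil => exact absurd ((PySem.List.sorted_eq_nil_iff _ _ _).mp hs) hempty
    | cons item rest =>
      rw [hs] at hhead
      have hitem : item = (best, (pvGroupsA standings).getD best []) := by
        simpa using hhead
      simp only [hempty, hs, pvKeys_eq, hbest, hitem]
      rw [pvGroupsA_getD]
      -- the filters agree: rows matching best are truthy (best ≠ "")
      have : (standings.filter pvT).filter (fun row => pvG row == best)
          = standings.filter (fun row => ((PySem.Dict.mk row).get? "group").getD "" == best) := by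
        rw [List.filter_filter]
        apply List.filter_congr
        intro row _
        by_cases h : ((PySem.Dict.mk row).get? "group").getD "" = best
        · simp [pvT, pvG, h, hbne]
        · simp [pvT, pvG, h]
      simpa using this
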